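-- pv_equiv track=rewrite | github.com/costamay/codility-practice | dive.py | solution
-- ===== SOURCE A (Python) =====
-- def solution(N):
--     if N < 1 or N > 200000:
--         raise ValueError("N is out of range")
--
--     result = []
--
--     # Initialize a list of lowercase letters ('a' to 'z')
--     letters = list("abcdefghijklmnopqrstuvwxyz")
--
--     # Determine the maximum number of letters you can use
--     max_letters = min(N, 26)
--
--     while N > 0:
--         # Calculate the number of repetitions for each letter
--         repetitions = N // max_letters
--
--         if repetitions == 0:
--             repetitions = 1  # Ensure at least one repetition
--
--         for i in range(max_letters):
--             result.append(letters[i] * repetitions)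
--             N -= repetitions
--
--     return ''.join(result)
-- ===== SOURCE B (Python) =====
-- def solution(N):
--     if N < 1 or N > 200000:
--         raise ValueError("N is out of range")
--     letters = "abcdefghijklmnopqrstuvwxyz"
--     m = min(N, 26)
--     q = N // m
--     core = ''.join(c * q for c in letters[:m])
--     if N % m != 0:
--         core += letters[:m]
--     return core
-- ===== Notes on version B (the rewrite author's own statement) =====
-- stated objective: simpler
-- what changed: Replaces the mutate-N while loop (which always runs at most two passes) by direct quotient/remainder arithmetic: build each letter block from q = N//m once, and append the plain alphabet prefix exactly when N % m != 0.
import Mathlib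
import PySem

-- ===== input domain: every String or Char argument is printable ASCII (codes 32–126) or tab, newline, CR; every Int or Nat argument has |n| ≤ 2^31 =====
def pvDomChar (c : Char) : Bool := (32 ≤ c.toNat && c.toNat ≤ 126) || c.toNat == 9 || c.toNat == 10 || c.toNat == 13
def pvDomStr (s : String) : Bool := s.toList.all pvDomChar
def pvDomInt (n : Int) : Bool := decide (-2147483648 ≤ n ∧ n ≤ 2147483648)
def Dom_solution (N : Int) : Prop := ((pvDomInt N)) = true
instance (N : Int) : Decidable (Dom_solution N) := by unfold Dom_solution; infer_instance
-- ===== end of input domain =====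

-- B replaces A's mutate-N while loop by direct quotient/remainder arithmetic (objective: simpler).

-- ===== PORT A =====
-- the while loop, fueled for totality (the fuel guard only makes the same computation total;
-- Python terminates in ≤ 2 iterations and the call site supplies ample fuel)
def solLoop (fuel : Nat) (letters : List Char) (maxLetters : Int) (N : Int)
    (result : List (List Char)) : List (List Char) :=
  match fuel with
  | 0 => result
  | fuel + 1 =>
    if N > 0 then
      let rep0 := PySem.Int.floordiv N maxLetters
      let repetitions := if rep0 = 0 then 1 else rep0
      -- for i in range(max_letters): result.append(letters[i] * repetitions); N -= repetitions
      let st := (PySem.List.pyRange 0 maxLetters 1).foldl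
        (fun (st : List (List Char) × Int) i =>
          (st.1 ++ [List.replicate repetitions.toNat (PySem.List.pyGetD letters i ' ')],
           st.2 - repetitions))
        (result, N)
      solLoop fuel letters maxLetters st.2 st.1
    else result

def solution (N : Int) : String :=
  if N < 1 ∨ N > 200000 then ""  -- Python raises ValueError here; excluded by Pre_solution
  else
    let letters := "abcdefghijklmnopqrstuvwxyz".toList
    let maxLetters := min N 26
    -- ''.join(result) is concatenation of the pieces
    String.ofList (List.flatten (solLoop (N.toNat + 1) letters maxLetters N []))

-- ===== PORT B =====
def solution_alt (N : Int) : String :=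
  if N < 1 ∨ N > 200000 then ""  -- Python raises ValueError here; excluded by Pre_solution
  else
    let letters := "abcdefghijklmnopqrstuvwxyz".toList
    let m := min N 26
    let q := PySem.Int.floordiv N m
    -- ''.join(c * q for c in letters[:m])   (1 ≤ m ≤ len(letters), so the slice is take)
    let core := ((letters.take m.toNat).map (fun c => List.replicate q.toNat c)).flatten
    String.ofList (if PySem.Int.mod N m ≠ 0 then core ++ letters.take m.toNat else core)

-- ===== PRECONDITION & SPEC =====
-- A raises ValueError exactly when N < 1 or N > 200000; Pre_ excludes only those inputs.
def Pre_solution (N : Int) : Prop := 1 ≤ N ∧ N ≤ 200000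
instance (N : Int) : Decidable (Pre_solution N) := by unfold Pre_solution; infer_instance
def pvWitness_solution : Int := (30)

def Spec_solution (N : Int) (out : String) : Prop := out = solution_alt N
instance (N : Int) (out : String) : Decidable (Spec_solution N out) := by unfold Spec_solution; infer_instance

-- ===== CLAIM (what is proved, stated in full; the proofs are below) =====
def Claim_equal_solution : Prop := ∀ (N : Int), Dom_solution N → Pre_solution N → Spec_solution N (solution N)

-- ===== LEMMAS AND PROOFS =====

-- the loop returns result unchanged once N ≤ 0, at any fuel
theorem solLoop_stop (fuel : Nat) (letters : List Char) (m N : Int)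
    (res : List (List Char)) (h : ¬ N > 0) :
    solLoop fuel letters m N res = res := by
  cases fuel with
  | zero => rfl
  | succ f => simp [solLoop, h]

theorem solLoop_step (fuel : Nat) (letters : List Char) (m N : Int)
    (res : List (List Char)) (h : N > 0) :
    solLoop (fuel + 1) letters m N res =
      let rep0 := PySem.Int.floordiv N m
      let rep := if rep0 = 0 then 1 else rep0
      let st := (PySem.List.pyRange 0 m 1).foldl
        (fun (st : List (List Char) × Int) i =>
          (st.1 ++ [List.replicate rep.toNat (PySem.List.pyGetD letters i ' ')], st.2 - rep))
        (res, N)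
      solLoop fuel letters m st.2 st.1 := by
  simp [solLoop, h]

-- the inner for-loop, as a pair of independent accumulators
theorem inner_fold (letters : List Char) (m rep N : Int) (res : List (List Char)) (hm : 0 ≤ m) :
    (PySem.List.pyRange 0 m 1).foldl
      (fun (st : List (List Char) × Int) i =>
        (st.1 ++ [List.replicate rep.toNat (PySem.List.pyGetD letters i ' ')], st.2 - rep))
      (res, N) =
    (res ++ (PySem.List.pyRange 0 m 1).map
        (fun i => List.replicate rep.toNat (PySem.List.pyGetD letters i ' ')),
     N - m * rep) := by
  have key : ∀ (l : List Int) (res : List (List Char)) (n : Int),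
      l.foldl
        (fun (st : List (List Char) × Int) i =>
          (st.1 ++ [List.replicate rep.toNat (PySem.List.pyGetD letters i ' ')], st.2 - rep))
        (res, n) =
      (res ++ l.map (fun i => List.replicate rep.toNat (PySem.List.pyGetD letters i ' ')),
       n - l.length * rep) := by
    intro l
    induction l with
    | nil => intro res n; simp
    | cons x t ih =>
      intro res n
      simp [List.foldl_cons, ih]
      ring
  have hlen : (PySem.List.pyRange 0 m 1).length = m.toNat := by
    simp [PySem.List.length_pyRange_one]
  rw [key, hlen]
  congr 1
  rw [Int.toNat_of_nonneg hm]

-- the mapped range is the alphabet prefix, mapped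
theorem map_range_take (letters : List Char) (f : Char → List Char) (m : Int)
    (_h0 : 0 ≤ m) (hlen : m.toNat ≤ letters.length) :
    (PySem.List.pyRange 0 m 1).map (fun i => f (PySem.List.pyGetD letters i ' ')) =
    (letters.take m.toNat).map f := by
  rw [PySem.List.pyRange_one]
  simp only [List.map_map]
  apply List.ext_getElem
  · simpa using hlen
  · intro k h1 h2
    have hk : k < m.toNat := by simpa using h1
    have hkl : k < letters.length := lt_of_lt_of_le hk hlen
    simp [PySem.List.pyGetD_natCast, List.getD_eq_getElem?_getD, hkl]

theorem flatten_map_single (l : List Char) : (l.map (fun c => [c])).flatten = l := by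
  induction l with
  | nil => rfl
  | cons x t ih => simp [ih]

theorem solution_eq (N : Int) (h : Pre_solution N) : solution N = solution_alt N := by
  obtain ⟨h1, h2⟩ := h
  have hcond : ¬ (N < 1 ∨ N > 200000) := by omega
  simp only [solution, solution_alt, if_neg hcond]
  set letters := "abcdefghijklmnopqrstuvwxyz".toList with hlet
  have hlen26 : letters.length = 26 := by decide
  set m := min N 26 with hmdef
  have hm1 : 1 ≤ m := by omega
  have hmN : m ≤ N := by omega
  have hm26 : m ≤ 26 := by omega
  have hmpos : (0:Int) < m := by omega
  set q := PySem.Int.floordiv N m with hqdef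
  set r := PySem.Int.mod N m with hrdef
  have hq1 : 1 ≤ q := by
    rw [hqdef, PySem.Int.le_floordiv_iff_mul_le hmpos, one_mul]; exact hmN
  have hr0 : 0 ≤ r := PySem.Int.mod_nonneg N hmpos
  have hrm : r < m := PySem.Int.mod_lt N hmpos
  have hqm : q * m + r = N := PySem.Int.floordiv_mul_add_mod N m
  have hNq : N - m * q = r := by rw [mul_comm]; omega
  have htake : m.toNat ≤ letters.length := by rw [hlen26]; omega
  obtain ⟨k, hk⟩ : ∃ k, N.toNat + 1 = k + 2 := ⟨N.toNat - 1, by omega⟩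
  rw [hk, solLoop_step _ _ _ _ _ (by omega : N > 0)]
  simp only
  rw [if_neg (by omega : ¬ q = 0), inner_fold _ _ _ _ _ (by omega : (0:Int) ≤ m),
      map_range_take _ _ _ (by omega) htake, hNq]
  simp only [List.nil_append]
  set core := (letters.take m.toNat).map (fun c => List.replicate q.toNat c) with hcore
  by_cases hr : r = 0
  · rw [solLoop_stop _ _ _ _ _ (by omega : ¬ r > 0)]
    rw [if_neg (by simp [hr])]
  · rw [solLoop_step _ _ _ _ _ (by omega : r > 0)]
    simp only
    have hfd0 : PySem.Int.floordiv r m = 0 := by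
      rw [PySem.Int.floordiv_eq_iff_of_pos hmpos]
      constructor
      · simpa using hr0
      · simpa using hrm
    rw [hfd0, if_pos rfl, inner_fold _ _ _ _ _ (by omega : (0:Int) ≤ m),
        map_range_take _ _ _ (by omega) htake]
    have hrep1 : (List.replicate (Int.toNat 1) : Char → List Char) = (fun c : Char => [c]) := by
      funext c; rfl
    dsimp only
    rw [hrep1, solLoop_stop _ _ _ _ _ (by omega : ¬ r - m * 1 > 0)]
    rw [if_pos hr, List.flatten_append, flatten_map_single]

-- ===== VERDICT (by name: the statement is the Claim_ definition above) =====
theorem solution_spec : Claim_equal_solution := by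
  intro N _ hpre
  exact solution_eq N hpre
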